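-- pv_equiv track=rewrite | github.com/Aasthaengg/IBMdataset | Python_codes/p02975/s736214008.py | binbin
-- ===== SOURCE A (Python) =====
-- import itertools
--
-- def binbin(a,b,c):
--     maxlen=max(len(bin(a)[2:]),len(bin(b)[2:]),len(bin(c)[2:]))
--     data2={"x":(maxlen-len(bin(a)[2:]))*"0"+bin(a)[2:],"y":(maxlen-len(bin(b)[2:]))*"0"+bin(b)[2:],"z":(maxlen-len(bin(c)[2:]))*"0"+bin(c)[2:]}
--
--     length=len(data2["x"])
--     ite=itertools.permutations("xyz")
--     for x,y,z in ite:
--         data=[]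
--         for i in range(length):
--             if not (int(data2[x][i]) + int(data2[y][i]))%2 == int(data2[z][i]):
--                 return(0)
--     return(1)
-- ===== SOURCE B (Python) =====
-- def binbin(a, b, c):
--     return 1 if a ^ b == c else 0
-- ===== Notes on version B (the rewrite author's own statement) =====
-- stated objective: simpler
-- what changed: B replaces A's padded binary-string construction and bit-by-bit scan over all 6 permutations with a single integer XOR and comparison (a ^ b == c).
-- outside the precondition, e.g. on binbin(-1, 0, 4): A returns 0, B returns 0
import Mathlib
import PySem

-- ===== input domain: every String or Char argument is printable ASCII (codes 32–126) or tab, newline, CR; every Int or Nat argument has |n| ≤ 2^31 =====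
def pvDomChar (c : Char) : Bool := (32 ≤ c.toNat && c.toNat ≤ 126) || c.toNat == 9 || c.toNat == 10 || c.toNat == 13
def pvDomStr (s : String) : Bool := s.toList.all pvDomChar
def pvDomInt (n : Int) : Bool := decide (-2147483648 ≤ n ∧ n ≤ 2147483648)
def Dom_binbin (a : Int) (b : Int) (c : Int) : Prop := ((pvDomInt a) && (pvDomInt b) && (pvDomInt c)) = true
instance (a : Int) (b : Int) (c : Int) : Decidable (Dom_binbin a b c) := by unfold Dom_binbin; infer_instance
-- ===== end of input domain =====

-- B replaces A's padded binary-string construction and six-permutation bit-by-bit scan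
-- with a single integer XOR and comparison (objective: simpler).


-- ===== PORT A =====
-- bin(n)[2:] for n ≥ 0, as a list of '0'/'1' chars (MSB first); exact on the
-- nonnegative domain admitted by Pre_binbin (Python's bin of a negative has a '-0b' prefix,
-- on which A raises; those inputs are outside Pre_binbin).
def pyBinDigits (n : Nat) : List Char :=
  if h : n = 0 then []
  else pyBinDigits (n / 2) ++ [if n % 2 = 1 then '1' else '0']
decreasing_by exact Nat.div_lt_self (Nat.pos_of_ne_zero h) (by norm_num)

def pyBin (n : Int) : List Char :=
  if n.toNat = 0 then ['0'] else pyBinDigits n.toNat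

-- Python int(ch) for ch ∈ {'0','1'} (the only chars reached inside Pre_binbin)
def pyIntChar (ch : Char) : Nat := if ch = '1' then 1 else 0

def binbin (a : Int) (b : Int) (c : Int) : Int :=
  let sa := pyBin a
  let sb := pyBin b
  let sc := pyBin c
  let maxlen := max (max sa.length sb.length) sc.length
  let data2 : PySem.Dict String (List Char) := PySem.Dict.ofList
    [("x", List.replicate (maxlen - sa.length) '0' ++ sa),
     ("y", List.replicate (maxlen - sb.length) '0' ++ sb),
     ("z", List.replicate (maxlen - sc.length) '0' ++ sc)]
  let length := (PySem.Dict.getD data2 "x" []).length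
  let perms : List (String × String × String) :=
    [("x","y","z"), ("x","z","y"), ("y","x","z"), ("y","z","x"), ("z","x","y"), ("z","y","x")]
  -- the for-loops with early `return 0` become `List.all`
  if perms.all (fun p =>
      (List.range length).all (fun i =>
        (pyIntChar ((PySem.Dict.getD data2 p.1 []).getD i ' ')
          + pyIntChar ((PySem.Dict.getD data2 p.2.1 []).getD i ' ')) % 2
          == pyIntChar ((PySem.Dict.getD data2 p.2.2 []).getD i ' ')))
  then 1 else 0

-- ===== PORT B =====
def binbin_alt (a : Int) (b : Int) (c : Int) : Int :=
  if Int.xor a b = c then 1 else 0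

-- ===== PRECONDITION & SPEC =====
-- Pre_ excludes negative arguments: there A's bin(n)[2:] still contains the 'b' of the
-- '-0b' prefix, so A raises ValueError on most such inputs and only returns (the value 0,
-- which B also returns) when a digit mismatch happens to precede the first 'b'.
def Pre_binbin (a : Int) (b : Int) (c : Int) : Prop := 0 ≤ a ∧ 0 ≤ b ∧ 0 ≤ c
instance (a : Int) (b : Int) (c : Int) : Decidable (Pre_binbin a b c) := by
  unfold Pre_binbin; infer_instance

def pvWitness_binbin : Int × Int × Int := (5, 3, 6)

def Spec_binbin (a : Int) (b : Int) (c : Int) (out : Int) : Prop := out = binbin_alt a b c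
instance (a : Int) (b : Int) (c : Int) (out : Int) : Decidable (Spec_binbin a b c out) := by
  unfold Spec_binbin; infer_instance

-- ===== CLAIM (what is proved, stated in full; the proofs are below) =====
def Claim_equal_binbin : Prop := ∀ (a : Int) (b : Int) (c : Int),
  Dom_binbin a b c → Pre_binbin a b c → Spec_binbin a b c (binbin a b c)

-- ===== LEMMAS AND PROOFS =====

def bitChar (b : Bool) : Char := if b then '1' else '0'

-- every number is below 2 ^ (number of its binary digits)
theorem lt_two_pow_len (n : Nat) : n < 2 ^ (pyBinDigits n).length := by
  induction n using Nat.strong_induction_on with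
  | _ n ih =>
    rw [pyBinDigits]
    split
    · simp_all
    · rename_i h
      have hlt := ih (n / 2) (Nat.div_lt_self (Nat.pos_of_ne_zero h) (by norm_num))
      simp only [List.length_append, List.length_singleton]
      have : n = 2 * (n / 2) + n % 2 := (Nat.div_add_mod n 2).symm ▸ by omega
      have h2 : n % 2 < 2 := Nat.mod_lt _ (by norm_num)
      rw [pow_succ]
      omega

theorem pyBin_lt (n : Int) : n.toNat < 2 ^ (pyBin n).length := by
  rw [pyBin]
  split
  · rename_i h; simp [h]
  · exact lt_two_pow_len _

-- characterisation of the left-zero-padded digit string: position i (from the left,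
-- out of L) holds the bit testBit n (L-1-i)
theorem padded_getD (L : Nat) : ∀ n : Nat, n < 2 ^ L →
    (pyBinDigits n).length ≤ L ∧
    ∀ i < L, (List.replicate (L - (pyBinDigits n).length) '0' ++ pyBinDigits n).getD i ' '
        = bitChar (n.testBit (L - 1 - i)) := by
  induction L with
  | zero => intro n hn; rw [pyBinDigits]; simp_all
  | succ L ih =>
    intro n hn
    rw [pyBinDigits]
    split
    · subst ‹n = 0›
      refine ⟨by simp, fun i hi => ?_⟩
      simp [List.getD, hi, bitChar]
    · rename_i h
      have hdiv : n / 2 < 2 ^ L := by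
        have : n < 2 * 2 ^ L := by rw [← pow_succ']; exact hn
        omega
      obtain ⟨hlen, hchar⟩ := ih (n / 2) hdiv
      have hlenp : (pyBinDigits (n / 2)).length + 1 ≤ L + 1 := by omega
      refine ⟨by simpa using hlenp, fun i hi => ?_⟩
      have hrw : L + 1 - (pyBinDigits (n / 2) ++ [if n % 2 = 1 then '1' else '0']).length
          = L - (pyBinDigits (n / 2)).length := by simp
      rw [hrw, ← List.append_assoc]
      have hplen : (List.replicate (L - (pyBinDigits (n / 2)).length) '0'
          ++ pyBinDigits (n / 2)).length = L := by simp; omega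
      rcases Nat.lt_or_ge i L with hiL | hiL
      · rw [List.getD_append _ _ _ _ (by omega)]
        rw [hchar i hiL]
        have : L + 1 - 1 - i = (L - 1 - i) + 1 := by omega
        rw [this, Nat.testBit_succ]
      · have hiL' : i = L := by omega
        subst hiL'
        rw [List.getD_append_right _ _ _ _ (by omega)]
        simp [hplen, bitChar, Nat.testBit_zero]

-- the three 0/1 digits seen at one position satisfy the mod-2 test iff the bits xor
theorem perm_cond (ba bb bc : Bool) :
    (((pyIntChar (bitChar ba) + pyIntChar (bitChar bb)) % 2 == pyIntChar (bitChar bc)) = true)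
      ↔ ((ba ^^ bb) = bc) := by
  cases ba <;> cases bb <;> cases bc <;> decide

-- the padded string binbin builds for n, characterised bit for bit
theorem padded_pyBin_getD (n : Int) (L : Nat) (hL : (pyBin n).length ≤ L) :
    ∀ i < L, (List.replicate (L - (pyBin n).length) '0' ++ pyBin n).getD i ' '
      = bitChar (n.toNat.testBit (L - 1 - i)) := by
  rw [pyBin]
  split
  · rename_i h0
    intro i hi
    rw [pyBin] at hL
    simp only [if_pos h0] at hL ⊢
    have : List.replicate (L - 1) '0' ++ ['0'] = List.replicate L '0' := by
      rw [← List.replicate_succ']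
      congr 1
      simp at hL; omega
    simp only [List.length_singleton] at *
    rw [this]
    simp [List.getD, hi, h0, bitChar]
  · rename_i h0
    have hlt : n.toNat < 2 ^ L := by
      calc n.toNat < 2 ^ (pyBinDigits n.toNat).length := lt_two_pow_len _
        _ ≤ 2 ^ L := Nat.pow_le_pow_right (by norm_num) (by rw [pyBin] at hL; simpa [h0] using hL)
    exact (padded_getD L n.toNat hlt).2

-- one pass of the inner loop ⇔ the corresponding per-bit xor equations
theorem one_perm (L mu mv mw : Nat) (pu pv pw : List Char)
    (hu : ∀ i < L, pu.getD i ' ' = bitChar (mu.testBit (L - 1 - i)))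
    (hv : ∀ i < L, pv.getD i ' ' = bitChar (mv.testBit (L - 1 - i)))
    (hw : ∀ i < L, pw.getD i ' ' = bitChar (mw.testBit (L - 1 - i))) :
    ((List.range L).all (fun i =>
        (pyIntChar (pu.getD i ' ') + pyIntChar (pv.getD i ' ')) % 2
          == pyIntChar (pw.getD i ' ')) = true)
      ↔ ∀ k < L, (mu.testBit k ^^ mv.testBit k) = mw.testBit k := by
  rw [List.all_eq_true]
  constructor
  · intro h k hk
    have h2 := h (L - 1 - k) (List.mem_range.mpr (by omega))
    simp only [hu _ (by omega : L - 1 - k < L), hv _ (by omega : L - 1 - k < L),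
      hw _ (by omega : L - 1 - k < L)] at h2
    have hi : L - 1 - (L - 1 - k) = k := by omega
    rw [hi] at h2
    exact (perm_cond _ _ _).mp h2
  · intro h i hi'
    have hi : i < L := List.mem_range.mp hi'
    simp only [hu _ hi, hv _ hi, hw _ hi]
    exact (perm_cond _ _ _).mpr (h _ (by omega))

-- all bits below L agree ⇔ the numbers are equal (everything lives below 2^L)
theorem bits_iff (L ma mb mc : Nat) (h1 : ma < 2 ^ L) (h2 : mb < 2 ^ L) (h3 : mc < 2 ^ L) :
    (∀ k < L, (ma.testBit k ^^ mb.testBit k) = mc.testBit k) ↔ ma ^^^ mb = mc := by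
  constructor
  · intro h
    apply Nat.eq_of_testBit_eq
    intro k
    rw [Nat.testBit_xor]
    rcases Nat.lt_or_ge k L with hk | hk
    · exact h k hk
    · have e1 := Nat.testBit_lt_two_pow (Nat.lt_of_lt_of_le h1 (Nat.pow_le_pow_right (by norm_num) hk))
      have e2 := Nat.testBit_lt_two_pow (Nat.lt_of_lt_of_le h2 (Nat.pow_le_pow_right (by norm_num) hk))
      have e3 := Nat.testBit_lt_two_pow (Nat.lt_of_lt_of_le h3 (Nat.pow_le_pow_right (by norm_num) hk))
      rw [e1, e2, e3]
      rfl
  · intro h k _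
    rw [← h, Nat.testBit_xor]

theorem xor_all (x y z : Bool) : (x ^^ y) = z →
    (((x ^^ z) = y) ∧ ((y ^^ x) = z) ∧ ((y ^^ z) = x) ∧ ((z ^^ x) = y) ∧ ((z ^^ y) = x)) := by
  cases x <;> cases y <;> cases z <;> decide

-- lookups in A's literal three-key dict
theorem dict3_x {v : Type} (vx vy vz d : v) :
    PySem.Dict.getD (PySem.Dict.ofList [("x", vx), ("y", vy), ("z", vz)]) "x" d = vx := by
  simp [PySem.Dict.ofList, PySem.Dict.getD, PySem.Dict.update, PySem.Dict.get?_insert]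

theorem dict3_y {v : Type} (vx vy vz d : v) :
    PySem.Dict.getD (PySem.Dict.ofList [("x", vx), ("y", vy), ("z", vz)]) "y" d = vy := by
  simp [PySem.Dict.ofList, PySem.Dict.getD, PySem.Dict.update, PySem.Dict.get?_insert]

theorem dict3_z {v : Type} (vx vy vz d : v) :
    PySem.Dict.getD (PySem.Dict.ofList [("x", vx), ("y", vy), ("z", vz)]) "z" d = vz := by
  simp [PySem.Dict.ofList, PySem.Dict.getD, PySem.Dict.update]

theorem binbin_eq (a b c : Int) (ha : 0 ≤ a) (hb : 0 ≤ b) (hc : 0 ≤ c) :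
    binbin a b c = binbin_alt a b c := by
  simp only [binbin, binbin_alt, List.all_cons, List.all_nil, Bool.and_true,
    dict3_x, dict3_y, dict3_z]
  set L := max (max (pyBin a).length (pyBin b).length) (pyBin c).length with hLdef
  set pa := List.replicate (L - (pyBin a).length) '0' ++ pyBin a with hpadef
  set pb := List.replicate (L - (pyBin b).length) '0' ++ pyBin b with hpbdef
  set pc := List.replicate (L - (pyBin c).length) '0' ++ pyBin c with hpcdef
  have hla : (pyBin a).length ≤ L := le_trans (le_max_left _ _) (le_max_left _ _)
  have hlb : (pyBin b).length ≤ L := le_trans (le_max_right _ _) (le_max_left _ _)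
  have hlc : (pyBin c).length ≤ L := le_max_right _ _
  have hpal : pa.length = L := by rw [hpadef]; simp; omega
  have hpa := padded_pyBin_getD a L hla
  have hpb := padded_pyBin_getD b L hlb
  have hpc := padded_pyBin_getD c L hlc
  have h1 : a.toNat < 2 ^ L := lt_of_lt_of_le (pyBin_lt a) (Nat.pow_le_pow_right (by norm_num) hla)
  have h2 : b.toNat < 2 ^ L := lt_of_lt_of_le (pyBin_lt b) (Nat.pow_le_pow_right (by norm_num) hlb)
  have h3 : c.toNat < 2 ^ L := lt_of_lt_of_le (pyBin_lt c) (Nat.pow_le_pow_right (by norm_num) hlc)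
  have P1 := one_perm L a.toNat b.toNat c.toNat pa pb pc hpa hpb hpc
  have P2 := one_perm L a.toNat c.toNat b.toNat pa pc pb hpa hpc hpb
  have P3 := one_perm L b.toNat a.toNat c.toNat pb pa pc hpb hpa hpc
  have P4 := one_perm L b.toNat c.toNat a.toNat pb pc pa hpb hpc hpa
  have P5 := one_perm L c.toNat a.toNat b.toNat pc pa pb hpc hpa hpb
  have P6 := one_perm L c.toNat b.toNat a.toNat pc pb pa hpc hpb hpa
  have hbits := bits_iff L a.toNat b.toNat c.toNat h1 h2 h3
  have hInt : Int.xor a b = c ↔ a.toNat ^^^ b.toNat = c.toNat := by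
    have key : ∀ m n : Nat, Int.xor (m : Int) (n : Int) = ((m ^^^ n : Nat) : Int) := fun _ _ => rfl
    rw [← Int.toNat_of_nonneg ha, ← Int.toNat_of_nonneg hb, ← Int.toNat_of_nonneg hc, key]
    exact Int.natCast_inj
  rw [hpal]
  split_ifs with hA hB
  · rfl
  · simp only [Bool.and_eq_true] at hA
    exact absurd (hInt.mpr (hbits.mp (P1.mp hA.1))) hB
  · rename_i hB
    have hx := hbits.mpr (hInt.mp hB)
    refine absurd ?_ hA
    simp only [Bool.and_eq_true]
    refine ⟨P1.mpr hx, P2.mpr ?_, P3.mpr ?_, P4.mpr ?_, P5.mpr ?_, P6.mpr ?_⟩ <;>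
      intro k hk <;> rcases xor_all _ _ _ (hx k hk) with ⟨q1, q2, q3, q4, q5⟩ <;> assumption
  · rfl

-- ===== VERDICT (by name: the statement is the Claim_ definition above) =====
theorem binbin_spec : Claim_equal_binbin := by
  intro a b c _ hpre
  exact binbin_eq a b c hpre.1 hpre.2.1 hpre.2.2
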